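-- pv_equiv track=rewrite | github.com/creativemindathome/popper_autoresearch_golf | knowledge_graph/visuals/visualize_parent_child_evolution.py | build_node_to_root
-- ===== SOURCE A (Python) =====
-- def build_node_to_root(children: dict[str, list[str]]) -> dict[str, str]:
--     roots = [
--         "node_root_data_pipeline",
--         "node_root_neural_network",
--         "node_root_training_eval",
--     ]
--     node_to_root: dict[str, str] = {}
--     for root in roots:
--         stack = [root]
--         seen: set[str] = set()
--         while stack:
--             nid = stack.pop()
--             if nid in seen:
--                 continue
--             seen.add(nid)
--             node_to_root[nid] = root
--             for c in children.get(nid, []):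
--                 stack.append(c)
--     return node_to_root
-- ===== SOURCE B (Python) =====
-- def build_node_to_root(children: dict[str, list[str]]) -> dict[str, str]:
--     roots = [
--         "node_root_data_pipeline",
--         "node_root_neural_network",
--         "node_root_training_eval",
--     ]
--     node_to_root: dict[str, str] = {}
--
--     def visit(nid: str, root: str, seen: set[str]) -> None:
--         if nid in seen:
--             return
--         seen.add(nid)
--         node_to_root[nid] = root
--         # reversed: visit children last-to-first so discovery order (and hence
--         # the returned dict's key order) is the LIFO order a stack would give
--         for c in reversed(children.get(nid, [])):
--             visit(c, root, seen)
--
--     for root in roots: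
--         visit(root, root, set())
--     return node_to_root
-- ===== Notes on version B (the rewrite author's own statement) =====
-- stated objective: alternative
-- what changed: A's explicit-stack while-loop is replaced by a recursive DFS helper visit(nid, root, seen) (children visited in reversed order, so discovery order and hence the returned dict's key order are unchanged); the shared node_to_root dict keeps last-root-wins semantics.
import Mathlib
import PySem

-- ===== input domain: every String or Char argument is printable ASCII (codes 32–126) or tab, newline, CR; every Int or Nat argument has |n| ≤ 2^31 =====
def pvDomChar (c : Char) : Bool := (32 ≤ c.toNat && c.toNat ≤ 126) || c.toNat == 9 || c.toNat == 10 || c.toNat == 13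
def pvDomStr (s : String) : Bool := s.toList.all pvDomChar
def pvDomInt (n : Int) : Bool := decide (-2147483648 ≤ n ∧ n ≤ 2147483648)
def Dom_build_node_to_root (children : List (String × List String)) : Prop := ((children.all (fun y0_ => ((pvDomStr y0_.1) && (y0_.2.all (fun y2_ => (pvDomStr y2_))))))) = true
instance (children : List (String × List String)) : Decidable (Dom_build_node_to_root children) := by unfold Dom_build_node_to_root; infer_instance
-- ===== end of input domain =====

-- B replaces A's explicit-stack while-loop with a recursive DFS helper (children visited
-- in reversed order so the returned dict's key order is unchanged); objective: alternative.

-- the three fixed roots of the Python source (shared constant of both ports)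
def pvRoots : List String :=
  ["node_root_data_pipeline", "node_root_neural_network", "node_root_training_eval"]

-- children.get(nid, []) — first-match association-list lookup (shared by both ports)
def pvChildGet (children : List (String × List String)) (nid : String) : List String :=
  (PySem.Dict.mk children).getD nid []

-- finite universe of all node ids that can ever be visited; used ONLY for the
-- termination measures of the two ports (it never influences a computed value)
def pvUniv (children : List (String × List String)) : Finset String :=
  ((children.flatMap Prod.snd) ++ children.map Prod.fst ++ pvRoots).toFinset

-- any child returned by the lookup is a listed child value (needed for termination)
lemma pvChildGet_mem_flatMap : ∀ (ch : List (String × List String)) (nid x : String),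
    x ∈ pvChildGet ch nid → x ∈ ch.flatMap Prod.snd := by
  intro ch
  induction ch with
  | nil =>
    intro nid x h
    simp [pvChildGet, PySem.Dict.getD, PySem.Dict.get?] at h
  | cons p rest ih =>
    intro nid x h
    rw [pvChildGet, PySem.Dict.getD_eq_get?_getD, PySem.Dict.get?_mk_cons] at h
    by_cases hk : (p.1 == nid) = true
    · rw [if_pos hk] at h
      simp only [Option.getD_some] at h
      exact List.mem_flatMap.mpr ⟨p, List.mem_cons_self, h⟩
    · rw [if_neg hk] at h
      have := ih nid x (by rwa [pvChildGet, PySem.Dict.getD_eq_get?_getD])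
      simp only [List.flatMap_cons, List.mem_append]
      exact Or.inr this
lemma pvChildGet_subset_univ (ch : List (String × List String)) (nid : String) :
    ∀ x ∈ (pvChildGet ch nid).reverse, x ∈ pvUniv ch := by
  intro x hx
  rw [List.mem_reverse] at hx
  simp only [pvUniv, List.mem_toFinset, List.mem_append]
  exact Or.inl (Or.inl (pvChildGet_mem_flatMap ch nid x hx))

-- measure facts for the termination of both ports
lemma pv_measure_tail (U : Finset String) (nid : String) (rest : List String)
    (seen : Finset String) :
    ((U ∪ rest.toFinset) \ seen).card ≤ ((U ∪ (nid :: rest).toFinset) \ seen).card := by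
  apply Finset.card_le_card
  apply Finset.sdiff_subset_sdiff _ (Finset.Subset.refl _)
  apply Finset.union_subset_union_right
  rw [List.toFinset_cons]
  exact Finset.subset_insert _ _

lemma pv_measure_push (U : Finset String) (cs rest : List String) (nid : String)
    (seen : Finset String) (hcs : ∀ x ∈ cs, x ∈ U) (hns : nid ∉ seen) :
    ((U ∪ (cs ++ rest).toFinset) \ insert nid seen).card
      < ((U ∪ (nid :: rest).toFinset) \ seen).card := by
  apply Finset.card_lt_card
  rw [Finset.ssubset_iff_of_subset]
  · refine ⟨nid, ?_, ?_⟩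
    · simp [hns]
    · simp
  · intro x hx
    simp only [Finset.mem_sdiff, Finset.mem_union, List.mem_toFinset, List.mem_append,
      List.toFinset_cons, Finset.mem_insert] at hx ⊢
    refine ⟨?_, fun h => hx.2 (Or.inr h)⟩
    rcases hx.1 with h | h
    · exact Or.inl h
    · rcases h with h | h
      · exact Or.inl (hcs x h)
      · exact Or.inr (Or.inr h)

lemma pv_measure_visit (U : Finset String) (l : List String) (nid : String)
    (seen : Finset String) (hl : ∀ x ∈ l, x ∈ U) (hns : nid ∉ seen) :
    ((U ∪ l.toFinset) \ insert nid seen).card < ((U ∪ {nid}) \ seen).card := by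
  apply Finset.card_lt_card
  rw [Finset.ssubset_iff_of_subset]
  · refine ⟨nid, ?_, ?_⟩
    · simp [hns]
    · simp
  · intro x hx
    simp only [Finset.mem_sdiff, Finset.mem_union, List.mem_toFinset, Finset.mem_singleton,
      Finset.mem_insert] at hx ⊢
    refine ⟨?_, fun h => hx.2 (Or.inr h)⟩
    rcases hx.1 with h | h
    · exact Or.inl h
    · exact Or.inl (hl x h)

lemma pv_measure_head (U : Finset String) (c : String) (cs : List String)
    (seen : Finset String) :
    ((U ∪ {c}) \ seen).card ≤ ((U ∪ (c :: cs).toFinset) \ seen).card := by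
  apply Finset.card_le_card
  apply Finset.sdiff_subset_sdiff _ (Finset.Subset.refl _)
  apply Finset.union_subset_union_right
  intro x hx
  simp only [Finset.mem_singleton] at hx
  simp [hx]

lemma pv_measure_rest (U : Finset String) (c : String) (cs : List String)
    (seen seen' : Finset String) (h : seen ⊆ seen') :
    ((U ∪ cs.toFinset) \ seen').card ≤ ((U ∪ (c :: cs).toFinset) \ seen).card := by
  apply Finset.card_le_card
  apply Finset.sdiff_subset_sdiff _ h
  apply Finset.union_subset_union_right
  rw [List.toFinset_cons]
  exact Finset.subset_insert _ _

-- ===== PORT A =====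
-- the while-loop of A; the Lean list models the Python stack with its HEAD as the top
-- (stack.pop() = take the head; 'for c in cs: stack.append(c)' = prepend cs.reverse)
def pvLoopA (ch : List (String × List String)) (root : String) :
    List String → Finset String → PySem.Dict String String → PySem.Dict String String
  | [], _, d => d
  | nid :: rest, seen, d =>
    if nid ∈ seen then pvLoopA ch root rest seen d
    else pvLoopA ch root ((pvChildGet ch nid).reverse ++ rest)
          (insert nid seen) (d.insert nid root)
  termination_by stack seen _ => (((pvUniv ch ∪ stack.toFinset) \ seen).card, stack.length)
  decreasing_by
  · rcases lt_or_eq_of_le (pv_measure_tail (pvUniv ch) nid rest seen) with h | h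
    · exact Prod.Lex.left _ _ h
    · rw [h]; exact Prod.Lex.right _ (Nat.lt_succ_self _)
  · exact Prod.Lex.left _ _
      (pv_measure_push (pvUniv ch) (pvChildGet ch nid).reverse rest nid seen
        (pvChildGet_subset_univ ch nid) (by assumption))

def build_node_to_root (children : List (String × List String)) : List (String × String) :=
  (pvRoots.foldl (fun d root => pvLoopA children root [root] ∅ d) PySem.Dict.empty).items

-- ===== PORT B =====
-- the recursive helper visit(nid, root, seen) of B; the mutated (seen, node_to_root) pair is
-- threaded as state; the subtype certificate 'seen only grows' is needed for termination
mutual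
def pvVisit (ch : List (String × List String)) (root : String) (nid : String)
    (seen : Finset String) (d : PySem.Dict String String) :
    {p : Finset String × PySem.Dict String String // seen ⊆ p.1} :=
  if nid ∈ seen then ⟨(seen, d), subset_rfl⟩
  else
    let r := pvVisitList ch root (pvChildGet ch nid).reverse (insert nid seen) (d.insert nid root)
    ⟨r.val, (Finset.subset_insert nid seen).trans r.prop⟩
  termination_by (((pvUniv ch ∪ {nid}) \ seen).card, 0)
  decreasing_by
    exact Prod.Lex.left _ _
      (pv_measure_visit (pvUniv ch) (pvChildGet ch nid).reverse nid seen
        (pvChildGet_subset_univ ch nid) (by assumption))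

-- the 'for c in reversed(children.get(nid, [])): visit(c, root, seen)' loop of B
def pvVisitList (ch : List (String × List String)) (root : String) (l : List String)
    (seen : Finset String) (d : PySem.Dict String String) :
    {p : Finset String × PySem.Dict String String // seen ⊆ p.1} :=
  match l with
  | [] => ⟨(seen, d), subset_rfl⟩
  | c :: cs =>
    let r1 := pvVisit ch root c seen d
    let r2 := pvVisitList ch root cs r1.val.1 r1.val.2
    ⟨r2.val, r1.prop.trans r2.prop⟩
  termination_by (((pvUniv ch ∪ l.toFinset) \ seen).card, l.length)
  decreasing_by
  · rcases lt_or_eq_of_le (pv_measure_head (pvUniv ch) c cs seen) with h | h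
    · exact Prod.Lex.left _ _ h
    · rw [h]; exact Prod.Lex.right _ (Nat.succ_pos _)
  · rcases lt_or_eq_of_le (pv_measure_rest (pvUniv ch) c cs seen r1.val.1 r1.prop) with h | h
    · exact Prod.Lex.left _ _ h
    · rw [h]; exact Prod.Lex.right _ (Nat.lt_succ_self _)
end

def build_node_to_root_alt (children : List (String × List String)) : List (String × String) :=
  (pvRoots.foldl (fun d root => (pvVisit children root root ∅ d).val.2) PySem.Dict.empty).items

-- ===== PRECONDITION & SPEC =====
def Spec_build_node_to_root (children : List (String × List String)) (out : List (String × String)) : Prop := out = build_node_to_root_alt children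
instance (children : List (String × List String)) (out : List (String × String)) : Decidable (Spec_build_node_to_root children out) := by unfold Spec_build_node_to_root; infer_instance

-- ===== CLAIM (what is proved, stated in full; the proofs are below) =====
def Claim_equal_build_node_to_root : Prop := ∀ (children : List (String × List String)), Dom_build_node_to_root children → Spec_build_node_to_root children (build_node_to_root children)

-- ===== LEMMAS AND PROOFS =====

-- unfolding equations of the well-founded definitions
lemma pvLoopA_nil (ch : List (String × List String)) (root : String)
    (seen : Finset String) (d : PySem.Dict String String) :
    pvLoopA ch root [] seen d = d := by
  rw [pvLoopA]

lemma pvLoopA_cons (ch : List (String × List String)) (root nid : String)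
    (rest : List String) (seen : Finset String) (d : PySem.Dict String String) :
    pvLoopA ch root (nid :: rest) seen d =
      if nid ∈ seen then pvLoopA ch root rest seen d
      else pvLoopA ch root ((pvChildGet ch nid).reverse ++ rest)
            (insert nid seen) (d.insert nid root) := by
  rw [pvLoopA]

lemma pvVisit_val_mem (ch : List (String × List String)) (root nid : String)
    (seen : Finset String) (d : PySem.Dict String String) (h : nid ∈ seen) :
    (pvVisit ch root nid seen d).val = (seen, d) := by
  rw [pvVisit]; simp [h]

lemma pvVisit_val_new (ch : List (String × List String)) (root nid : String)
    (seen : Finset String) (d : PySem.Dict String String) (h : nid ∉ seen) :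
    (pvVisit ch root nid seen d).val =
      (pvVisitList ch root (pvChildGet ch nid).reverse (insert nid seen)
        (d.insert nid root)).val := by
  rw [pvVisit]; simp [h]

lemma pvVisitList_val_nil (ch : List (String × List String)) (root : String)
    (seen : Finset String) (d : PySem.Dict String String) :
    (pvVisitList ch root [] seen d).val = (seen, d) := by
  rw [pvVisitList]

lemma pvVisitList_val_cons (ch : List (String × List String)) (root c : String)
    (cs : List String) (seen : Finset String) (d : PySem.Dict String String) :
    (pvVisitList ch root (c :: cs) seen d).val =
      (pvVisitList ch root cs (pvVisit ch root c seen d).val.1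
        (pvVisit ch root c seen d).val.2).val := by
  rw [pvVisitList]

-- the bridge: popping a block l off the stack is the same as recursively visiting l
lemma pvBridge (ch : List (String × List String)) (root : String) :
    ∀ n : ℕ, ∀ seen : Finset String, (pvUniv ch \ seen).card = n →
    ∀ l : List String, (∀ x ∈ l, x ∈ pvUniv ch) →
    ∀ (d : PySem.Dict String String) (s : List String),
    pvLoopA ch root (l ++ s) seen d =
      pvLoopA ch root s (pvVisitList ch root l seen d).val.1
        (pvVisitList ch root l seen d).val.2 := by
  intro n
  induction n using Nat.strong_induction_on with
  | _ n IH =>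
  intro seen hn l
  induction l with
  | nil =>
    intro _ d s
    simp [pvVisitList_val_nil]
  | cons c cs IHl =>
    intro hl d s
    have hc_univ : c ∈ pvUniv ch := hl c (by simp)
    by_cases hc : c ∈ seen
    · rw [List.cons_append, pvLoopA_cons, if_pos hc,
        IHl (fun x hx => hl x (by simp [hx])) d s,
        pvVisitList_val_cons, pvVisit_val_mem ch root c seen d hc]
    · rw [List.cons_append, pvLoopA_cons, if_neg hc]
      have hm1 : (pvUniv ch \ insert c seen).card < n := by
        subst hn
        rw [Finset.sdiff_insert]
        exact Finset.card_erase_lt_of_mem (Finset.mem_sdiff.mpr ⟨hc_univ, hc⟩)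
      rw [IH _ hm1 (insert c seen) rfl (pvChildGet ch c).reverse
        (pvChildGet_subset_univ ch c) (d.insert c root) (cs ++ s)]
      have hm2 : (pvUniv ch \ (pvVisitList ch root (pvChildGet ch c).reverse
          (insert c seen) (d.insert c root)).val.1).card < n := by
        refine lt_of_le_of_lt (Finset.card_le_card
          (Finset.sdiff_subset_sdiff (Finset.Subset.refl _) ?_)) hm1
        exact (pvVisitList ch root (pvChildGet ch c).reverse
          (insert c seen) (d.insert c root)).prop
      rw [IH _ hm2 _ rfl cs (fun x hx => hl x (by simp [hx])) _ s,
        pvVisitList_val_cons, pvVisit_val_new ch root c seen d hc]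

-- one root: running A's stack loop from [root] equals B's visit(root)
lemma pvStep (ch : List (String × List String)) (root : String)
    (hroot : root ∈ pvUniv ch) (d : PySem.Dict String String) :
    pvLoopA ch root [root] ∅ d = (pvVisit ch root root ∅ d).val.2 := by
  have h := pvBridge ch root _ ∅ rfl [root]
    (by intro x hx; simp only [List.mem_singleton] at hx; exact hx ▸ hroot) d []
  simp only [List.append_nil] at h
  rw [h, pvLoopA_nil, pvVisitList_val_cons, pvVisitList_val_nil]

lemma pvRoot_mem (ch : List (String × List String)) (r : String) (hr : r ∈ pvRoots) :
    r ∈ pvUniv ch := by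
  simp only [pvUniv, List.mem_toFinset, List.mem_append]
  tauto

-- ===== VERDICT (by name: the statement is the Claim_ definition above) =====
theorem build_node_to_root_spec : Claim_equal_build_node_to_root := by
  intro children _
  unfold Spec_build_node_to_root build_node_to_root build_node_to_root_alt
  simp only [pvRoots, List.foldl]
  rw [pvStep children _ (pvRoot_mem children _ (by simp [pvRoots])),
    pvStep children _ (pvRoot_mem children _ (by simp [pvRoots])),
    pvStep children _ (pvRoot_mem children _ (by simp [pvRoots]))]
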